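-- pv_equiv track=rewrite | github.com/daniel-reich/ubiquitous-fiesta | D6XfxhRobdQvbKX4v_15.py | first_before_second
-- ===== SOURCE A (Python) =====
-- def first_before_second(s, first, second):
--   true = True
--   firstIndexes = [i for i, j in enumerate(s) if j == first]
--   secondIndexes = [i for i, j in enumerate(s) if j == second]
--   for fIndex in firstIndexes:
--     for sIndex in secondIndexes:
--       if fIndex > sIndex:
--         true = False
--       else:
--         pass
--   return true
-- ===== SOURCE B (Python) =====
-- def first_before_second(s, first, second):
--   last_first = -1
--   first_second = -1
--   for i, c in enumerate(s):
--     if c == first: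
--       last_first = i
--     if c == second and first_second < 0:
--       first_second = i
--   return last_first < 0 or first_second < 0 or last_first <= first_second
-- ===== Notes on version B (the rewrite author's own statement) =====
-- stated objective: faster
-- what changed: Replaces the two index-list comprehensions and the nested all-pairs loop with a single pass that tracks the last index of `first` and the first index of `second` and compares them once.
import Mathlib
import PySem

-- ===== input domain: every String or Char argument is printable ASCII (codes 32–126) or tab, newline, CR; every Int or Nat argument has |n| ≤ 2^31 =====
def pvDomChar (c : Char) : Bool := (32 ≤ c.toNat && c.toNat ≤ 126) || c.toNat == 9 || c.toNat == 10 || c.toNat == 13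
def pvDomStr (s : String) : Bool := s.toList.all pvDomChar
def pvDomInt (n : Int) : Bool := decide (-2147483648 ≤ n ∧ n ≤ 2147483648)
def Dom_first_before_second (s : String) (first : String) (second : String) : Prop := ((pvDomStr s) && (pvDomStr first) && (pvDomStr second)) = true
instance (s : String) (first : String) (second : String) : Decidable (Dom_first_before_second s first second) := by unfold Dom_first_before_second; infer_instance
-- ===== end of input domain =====

-- B replaces A's two index lists and nested all-pairs loop by one pass tracking the
-- last index of `first` and the first index of `second` (objective: faster).

-- ===== PORT A =====
def first_before_second (s : String) (first : String) (second : String) : Bool :=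
  let firstIndexes := (PySem.List.enumerate s.toList 0).filterMap
    (fun p => if first.toList = [p.2] then some p.1 else none)
  let secondIndexes := (PySem.List.enumerate s.toList 0).filterMap
    (fun p => if second.toList = [p.2] then some p.1 else none)
  firstIndexes.foldl (fun t fIndex =>
    secondIndexes.foldl (fun t sIndex => if fIndex > sIndex then false else t) t) true

-- ===== PORT B =====
def first_before_second_alt (s : String) (first : String) (second : String) : Bool :=
  let st := (PySem.List.enumerate s.toList 0).foldl
    (fun (st : Int × Int) p =>
      ((if first.toList = [p.2] then p.1 else st.1),
       (if second.toList = [p.2] ∧ st.2 < 0 then p.1 else st.2)))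
    (-1, -1)
  decide (st.1 < 0) || decide (st.2 < 0) || decide (st.1 ≤ st.2)

-- ===== PRECONDITION & SPEC =====
def Spec_first_before_second (s : String) (first : String) (second : String) (out : Bool) : Prop := out = first_before_second_alt s first second
instance (s : String) (first : String) (second : String) (out : Bool) : Decidable (Spec_first_before_second s first second out) := by unfold Spec_first_before_second; infer_instance

-- ===== CLAIM (what is proved, stated in full; the proofs are below) =====
def Claim_equal_first_before_second : Prop := ∀ (s : String) (first : String) (second : String), Dom_first_before_second s first second → Spec_first_before_second s first second (first_before_second s first second)

-- ===== LEMMAS AND PROOFS =====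

-- A's inner loop: the flag-flipping fold equals "&& all".
theorem pv_inner_fold (l : List Int) (fi : Int) (t0 : Bool) :
    l.foldl (fun t sIndex => if fi > sIndex then false else t) t0
      = (t0 && l.all (fun si => decide (fi ≤ si))) := by
  induction l generalizing t0 with
  | nil => simp
  | cons a l ih =>
    simp only [List.foldl_cons, List.all_cons, ih]
    by_cases h : fi > a
    · simp [h, not_le.mpr h]
    · simp [h, not_lt.mp h]

theorem pv_outer_fold (F S : List Int) (t0 : Bool) :
    F.foldl (fun t fIndex =>
        S.foldl (fun t sIndex => if fIndex > sIndex then false else t) t) t0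
      = (t0 && F.all (fun fi => S.all (fun si => decide (fi ≤ si)))) := by
  induction F generalizing t0 with
  | nil => simp
  | cons a F ih =>
    simp only [List.foldl_cons]
    rw [ih, pv_inner_fold]
    simp [Bool.and_assoc]

-- getLast? of a cons, with a default.
theorem pv_getLast_cons_getD (x : Int) (l : List Int) (d : Int) :
    ((x :: l).getLast?.getD d) = l.getLast?.getD x := by
  cases l with
  | nil => simp
  | cons a l =>
    rw [List.getLast?_cons_cons]
    obtain ⟨b, hb⟩ : ∃ b, (a :: l).getLast? = some b := by
      cases h : (a :: l).getLast? with
      | none => simp [List.getLast?_eq_none_iff] at h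
      | some b => exact ⟨b, rfl⟩
    simp [hb]

-- B's fold state, characterised via A's two filterMap index lists
-- (needs nonnegative indices, which enumerate from 0 provides).
theorem pv_alt_state (first second : String) (l : List (Int × Char)) (st : Int × Int)
    (hnn : ∀ q ∈ l, (0 : Int) ≤ q.1) :
    l.foldl (fun (st : Int × Int) p =>
      ((if first.toList = [p.2] then p.1 else st.1),
       (if second.toList = [p.2] ∧ st.2 < 0 then p.1 else st.2))) st
    = ((l.filterMap (fun p => if first.toList = [p.2] then some p.1 else none)).getLast?.getD st.1,
       if st.2 < 0
       then (l.filterMap (fun p => if second.toList = [p.2] then some p.1 else none)).head?.getD st.2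
       else st.2) := by
  induction l generalizing st with
  | nil => simp
  | cons p l ih =>
    have hp0 : (0 : Int) ≤ p.1 := hnn p (by simp)
    have hnn' : ∀ q ∈ l, (0 : Int) ≤ q.1 := fun q hq => hnn q (by simp [hq])
    have hq : ¬ (p.1 < 0) := not_lt.mpr hp0
    simp only [List.foldl_cons]
    rw [ih _ hnn', List.filterMap_cons, List.filterMap_cons]
    by_cases hf : first.toList = [p.2] <;> by_cases hs : second.toList = [p.2] <;>
      by_cases h2 : st.2 < 0 <;>
      simp [hf, hs, h2, hq, List.head?_cons, Option.getD_some, pv_getLast_cons_getD]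

-- every element of a <-pairwise list is ≤ its last element
theorem pv_le_getLast (l : List Int) (hp : l.Pairwise (· < ·)) (a b : Int)
    (ha : a ∈ l) (hb : l.getLast? = some b) : a ≤ b := by
  induction l with
  | nil => cases ha
  | cons x l ih =>
    rcases List.mem_cons.mp ha with rfl | ha'
    · cases l with
      | nil => simp_all
      | cons y l =>
        have : b ∈ y :: l := List.mem_of_getLast? (by simpa [List.getLast?_cons_cons] using hb)
        exact le_of_lt ((List.pairwise_cons.mp hp).1 b this)
    · cases l with
      | nil => cases ha'
      | cons y l =>
        exact ih (List.pairwise_cons.mp hp).2 ha' (by simpa [List.getLast?_cons_cons] using hb)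

-- the head of a <-pairwise list is ≤ every element
theorem pv_head_le (l : List Int) (hp : l.Pairwise (· < ·)) (a b : Int)
    (ha : a ∈ l) (hb : l.head? = some b) : b ≤ a := by
  cases l with
  | nil => cases ha
  | cons x l =>
    simp only [List.head?_cons, Option.some.injEq] at hb
    subst hb
    rcases List.mem_cons.mp ha with rfl | ha'
    · exact le_refl a
    · exact le_of_lt ((List.pairwise_cons.mp hp).1 a ha')

-- the all-all test equals the last-of-F vs head-of-S comparison, for sorted nonnegative lists
theorem pv_combine (F S : List Int)
    (Fpair : F.Pairwise (· < ·)) (Spair : S.Pairwise (· < ·))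
    (Fnn : ∀ a ∈ F, (0 : Int) ≤ a) (Snn : ∀ a ∈ S, (0 : Int) ≤ a) :
    F.all (fun fi => S.all (fun si => decide (fi ≤ si)))
      = (decide (F.getLast?.getD (-1) < 0) || decide (S.head?.getD (-1) < 0) ||
         decide (F.getLast?.getD (-1) ≤ S.head?.getD (-1))) := by
  cases hFc : F with
  | nil => simp
  | cons x F' =>
    cases hSc : S with
    | nil => simp [List.all_eq_true]
    | cons y S' =>
      obtain ⟨b, hb⟩ : ∃ b, (x :: F').getLast? = some b := by
        cases h : (x :: F').getLast? with
        | none => simp [List.getLast?_eq_none_iff] at h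
        | some b => exact ⟨b, rfl⟩
      have hbF : b ∈ x :: F' := List.mem_of_getLast? hb
      have hyS : y ∈ y :: S' := by simp
      have hb0 : (0:Int) ≤ b := Fnn b (hFc ▸ hbF)
      have hy0 : (0:Int) ≤ y := Snn y (hSc ▸ hyS)
      have Fpair' : (x :: F').Pairwise (· < ·) := hFc ▸ Fpair
      have Spair' : (y :: S').Pairwise (· < ·) := hSc ▸ Spair
      rw [hb, List.head?_cons]
      simp only [Option.getD_some]
      have hb' : ¬ (b < 0) := not_lt.mpr hb0
      have hy' : ¬ (y < 0) := not_lt.mpr hy0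
      by_cases hby : b ≤ y
      · have hall : ∀ fi ∈ x :: F', ∀ si ∈ y :: S', fi ≤ si := by
          intro fi hfi si hsi
          exact le_trans (pv_le_getLast _ Fpair' fi b hfi hb)
            (le_trans hby (pv_head_le _ Spair' si y hsi (List.head?_cons)))
        simp only [hb', hy', hby, decide_true, Bool.or_true, List.all_eq_true]
        intro fi hfi si hsi
        exact decide_eq_true (hall fi hfi si hsi)
      · simp only [hb', hy', hby, decide_false, Bool.or_false]
        simp only [List.all_eq_false]
        exact ⟨b, hbF, by simp [hby]⟩

theorem pv_spec' (s first second : String) :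
    first_before_second s first second = first_before_second_alt s first second := by
  have enn : ∀ q ∈ PySem.List.enumerate s.toList 0, (0 : Int) ≤ q.1 := by
    intro q hq
    rcases (PySem.List.mem_enumerate_iff _ _ _).mp hq with ⟨k, hk, rfl⟩
    simp
  have epair : (PySem.List.enumerate s.toList 0).Pairwise (fun p q => p.1 < q.1) :=
    PySem.List.pairwise_lt_enumerate _ _
  have Fpair : ((PySem.List.enumerate s.toList 0).filterMap
      (fun p => if first.toList = [p.2] then some p.1 else none)).Pairwise (· < ·) := by
    refine List.Pairwise.filterMap _ (fun p q h => ?_) epair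
    intro a ha b hb
    by_cases h1 : first.toList = [p.2] <;> by_cases h2 : first.toList = [q.2] <;> simp_all
  have Spair : ((PySem.List.enumerate s.toList 0).filterMap
      (fun p => if second.toList = [p.2] then some p.1 else none)).Pairwise (· < ·) := by
    refine List.Pairwise.filterMap _ (fun p q h => ?_) epair
    intro a ha b hb
    by_cases h1 : second.toList = [p.2] <;> by_cases h2 : second.toList = [q.2] <;> simp_all
  have Fnn : ∀ a ∈ ((PySem.List.enumerate s.toList 0).filterMap
      (fun p => if first.toList = [p.2] then some p.1 else none)), (0 : Int) ≤ a := by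
    intro a ha
    rcases List.mem_filterMap.mp ha with ⟨p, hp, hpa⟩
    by_cases hc : first.toList = [p.2]
    · simp only [hc, if_true, Option.some.injEq] at hpa
      exact hpa ▸ enn p hp
    · simp [hc] at hpa
  have Snn : ∀ a ∈ ((PySem.List.enumerate s.toList 0).filterMap
      (fun p => if second.toList = [p.2] then some p.1 else none)), (0 : Int) ≤ a := by
    intro a ha
    rcases List.mem_filterMap.mp ha with ⟨p, hp, hpa⟩
    by_cases hc : second.toList = [p.2]
    · simp only [hc, if_true, Option.some.injEq] at hpa
      exact hpa ▸ enn p hp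
    · simp [hc] at hpa
  unfold first_before_second first_before_second_alt
  rw [pv_outer_fold, pv_alt_state first second _ _ enn, Bool.true_and]
  exact pv_combine _ _ Fpair Spair Fnn Snn

-- ===== VERDICT (by name: the statement is the Claim_ definition above) =====
theorem first_before_second_spec : Claim_equal_first_before_second := by
  intro s first second _
  exact pv_spec' s first second
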